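-- pv_equiv track=rewrite | github.com/mewturn/hackerrank | Algorithms/Implementation/sumset.py | sumSet
-- ===== SOURCE A (Python) =====
-- def sumSet(arr):
--     myset = set()
--
--     # Build dictionary
--     alphabets = 'abcdefghijklmnopqrstuvwxyz'
--     mydict = {}
--     for i in range(1, len(alphabets)+1):
--         mydict[alphabets[i-1]] = i
--
--     current_substring = arr[0]
--     myset.add(mydict[arr[0]])
--
--     for i in range(1, len(arr)):
--         value = mydict[arr[i]]
--         if arr[i] not in current_substring:
--             current_substring = arr[i]
--             mysum = value
--
--         else:
--             current_substring += arr[i]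
--             mysum = value * len(current_substring)
--
--         myset.add(mysum)
--
--     return myset
-- ===== SOURCE B (Python) =====
-- def sumSet(arr):
--     # Two staged passes: run-length encode the string first, then expand each
--     # run (c, L) into the multiples v, 2v, ..., Lv of its letter value.
--     alphabet = 'abcdefghijklmnopqrstuvwxyz'
--     runs = []
--     for c in arr:
--         if runs and runs[-1][0] == c:
--             runs[-1][1] += 1
--         else:
--             runs.append([c, 1])
--     out = set()
--     for c, length in runs:
--         v = alphabet.index(c) + 1
--         for k in range(1, length + 1):
--             out.add(v * k)
--     return out
-- ===== Notes on version B (the rewrite author's own statement) =====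
-- stated objective: alternative
-- what changed: B is a two-stage algorithm: it first run-length encodes the string into (char, length) pairs, then expands each run into the multiples v*1..v*L of its letter value alphabet.index(c)+1, instead of A's single pass that grows a current_substring, tests character membership in it and looks each value up in a precomputed dict; Pre_ excludes only inputs on which A raises (empty string: IndexError; a character that is not a lowercase letter: KeyError).
import Mathlib
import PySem

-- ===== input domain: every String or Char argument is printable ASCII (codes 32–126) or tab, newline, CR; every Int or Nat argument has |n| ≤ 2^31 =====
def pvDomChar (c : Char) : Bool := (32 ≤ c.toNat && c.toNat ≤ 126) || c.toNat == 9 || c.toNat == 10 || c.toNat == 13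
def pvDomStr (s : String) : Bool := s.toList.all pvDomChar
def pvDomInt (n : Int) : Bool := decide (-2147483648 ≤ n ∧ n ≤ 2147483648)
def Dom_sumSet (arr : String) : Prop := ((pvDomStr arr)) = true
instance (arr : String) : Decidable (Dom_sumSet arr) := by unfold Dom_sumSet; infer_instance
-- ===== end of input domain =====

-- B: two staged passes — run-length encode the string, then expand each run (c, L)
-- into the multiples v*1..v*L of its letter value ord(c)-96 — instead of A's single
-- pass with a precomputed letter dict and a growing substring; return value only.

-- ===== PORT A =====
-- 'for i in range(1, len(alphabets)+1): mydict[alphabets[i-1]] = i'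
def pvAlphabets : List Char := "abcdefghijklmnopqrstuvwxyz".toList

def pvMydict : PySem.Dict Char Int :=
  (PySem.List.pyRange 1 ((pvAlphabets.length : Int) + 1) 1).foldl
    (fun d i =>
      match PySem.Chars.pyGet? pvAlphabets (i - 1) with
      | some c => d.insert c i
      | none => d)          -- unreachable: i-1 is always in range
    PySem.Dict.empty

-- A's loop body; 'arr[i] not in current_substring' is substring containment of the
-- one-char string arr[i], ported exactly with PySem.Chars.isIn.
def pvStepA (st : List Char × PySem.Set Int) (c : Char) : List Char × PySem.Set Int :=
  let value := pvMydict.getD c 0        -- mydict[arr[i]]; KeyError excluded by Pre_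
  if PySem.Chars.isIn [c] st.1 = false then
    ([c], PySem.Set.add st.2 value)
  else
    let cur := st.1 ++ [c]
    (cur, PySem.Set.add st.2 (value * (cur.length : Int)))

def sumSet (arr : String) : List Int :=
  match arr.toList with
  | [] => []                 -- Python raises IndexError on arr[0]; excluded by Pre_
  | c0 :: _ =>
    let cs := arr.toList
    let myset : PySem.Set Int := PySem.Set.add PySem.Set.empty (pvMydict.getD c0 0)
    let st :=
      (PySem.List.pyRange 1 (cs.length : Int) 1).foldl
        (fun st i => pvStepA st (PySem.List.pyGetD cs i ' '))
        ([c0], myset)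
    st.2

-- ===== PORT B =====
-- v = alphabet.index(c) + 1; where Python's .index raises ValueError (c not a
-- lowercase letter, excluded by Pre_) Chars.find is -1 and the port returns 0.
def pvValB (c : Char) : Int := PySem.Chars.find pvAlphabets [c] + 1

-- stage 1 body: append a fresh run [c, 1] or bump the last run's length
def pvRunsStep (rs : List (Char × Int)) (c : Char) : List (Char × Int) :=
  match rs.getLast? with
  | some (rc, n) => if rc == c then rs.dropLast ++ [(rc, n + 1)] else rs ++ [(c, 1)]
  | none => [(c, 1)]

-- stage 2 body: 'for k in range(1, length + 1): out.add(v * k)'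
def pvExpandRun (s : PySem.Set Int) (r : Char × Int) : PySem.Set Int :=
  (PySem.List.pyRange 1 (r.2 + 1) 1).foldl (fun s k => PySem.Set.add s (pvValB r.1 * k)) s

def sumSet_alt (arr : String) : List Int :=
  (arr.toList.foldl pvRunsStep []).foldl pvExpandRun PySem.Set.empty

-- ===== PRECONDITION & SPEC =====
-- Pre_ excludes exactly the inputs on which A raises: the empty string (IndexError on
-- arr[0]) and strings containing a non-lowercase-letter character (KeyError in mydict).
def Pre_sumSet (arr : String) : Prop :=
  arr.toList ≠ [] ∧ arr.toList.all (fun c => decide (97 ≤ c.toNat ∧ c.toNat ≤ 122)) = true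
instance (arr : String) : Decidable (Pre_sumSet arr) := by unfold Pre_sumSet; infer_instance

def pvWitness_sumSet : String := "aabcc"

def Spec_sumSet (arr : String) (out : List Int) : Prop := out = sumSet_alt arr
instance (arr : String) (out : List Int) : Decidable (Spec_sumSet arr out) := by unfold Spec_sumSet; infer_instance

-- ===== CLAIM (what is proved, stated in full; the proofs are below) =====
def Claim_equal_sumSet : Prop := ∀ (arr : String), Dom_sumSet arr → Pre_sumSet arr → Spec_sumSet arr (sumSet arr)

-- ===== LEMMAS AND PROOFS =====

-- a char with code in 97..122 is one of A's dict keys 'a'..'z'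
theorem pvMemAlphabets (c : Char) (h1 : 97 ≤ c.toNat) (h2 : c.toNat ≤ 122) :
    c ∈ pvAlphabets := by
  have hv : c = Char.ofNat c.toNat := by rw [Char.ofNat_toNat]
  interval_cases h : c.toNat <;> simp_all [pvAlphabets]

-- recursive characterisation of B's run-length encoding, used only by the proofs
def pvRle (rc : Char) (k : Int) : List Char → List (Char × Int)
  | [] => [(rc, k)]
  | c :: cs => if rc == c then pvRle rc (k + 1) cs else (rc, k) :: pvRle c 1 cs

theorem pvRuns_eq_rle (rest : List Char) :
    ∀ (acc : List (Char × Int)) (rc : Char) (k : Int),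
    rest.foldl pvRunsStep (acc ++ [(rc, k)]) = acc ++ pvRle rc k rest := by
  induction rest with
  | nil => intro acc rc k; rfl
  | cons c rest ih =>
    intro acc rc k
    rw [List.foldl_cons]
    have hstep : pvRunsStep (acc ++ [(rc, k)]) c =
        if rc == c then acc ++ [(rc, k + 1)] else (acc ++ [(rc, k)]) ++ [(c, 1)] := by
      simp [pvRunsStep]
    by_cases h : rc = c
    · subst h
      simp only [hstep, BEq.rfl, if_true]
      rw [ih acc rc (k + 1)]
      simp [pvRle]
    · have hne : (rc == c) = false := by simp [h]
      simp only [hstep, hne, Bool.false_eq_true, if_false]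
      rw [ih (acc ++ [(rc, k)]) c 1]
      simp [pvRle, hne]

-- the dict A builds maps each lowercase letter to its 1-based position = ord(c) - 96
theorem pvMydict_getD (c : Char) (hc : c ∈ pvAlphabets) :
    pvMydict.getD c 0 = pvValB c := by
  have hall : pvAlphabets.all (fun c => pvMydict.getD c 0 == pvValB c) = true := by
    decide
  exact eq_of_beq (List.all_eq_true.mp hall c hc)

theorem isIn_replicate (c rc : Char) (k : Nat) (hk : 1 ≤ k) :
    PySem.Chars.isIn [c] (List.replicate k rc) = (c == rc) := by
  by_cases h : c = rc
  · subst h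
    have hmem : c ∈ List.replicate k c := List.mem_replicate.mpr ⟨by omega, rfl⟩
    have : [c] <:+: List.replicate k c := (List.singleton_infix_iff c _).mpr hmem
    simp [(PySem.Chars.isIn_iff_infix _ _).mpr this]
  · have hnin : ¬ ([c] <:+: List.replicate k rc) := by
      intro hin
      have : c ∈ List.replicate k rc := hin.mem (List.mem_singleton.mpr rfl)
      exact h (List.mem_replicate.mp this).2
    have : PySem.Chars.isIn [c] (List.replicate k rc) = false := by
      rw [← Bool.not_eq_true]
      exact fun ht => hnin ((PySem.Chars.isIn_iff_infix _ _).mp ht)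
    simp [this, h]

-- extending a run's expansion by one more multiple
theorem expandRun_succ (rc : Char) (k : Nat) (s : PySem.Set Int) :
    pvExpandRun s (rc, (k : Int) + 1)
      = PySem.Set.add (pvExpandRun s (rc, (k : Int))) (pvValB rc * ((k : Int) + 1)) := by
  unfold pvExpandRun
  have h : PySem.List.pyRange 1 ((k : Int) + 1 + 1) 1
      = PySem.List.pyRange 1 ((k : Int) + 1) 1 ++ [(k : Int) + 1] := by
    exact PySem.List.pyRange_one_succ_right (by omega)
  rw [h, List.foldl_append]
  rfl

-- loop invariant: A's state is (replicate k rc, the set after expanding the current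
-- run to length k); then A's remaining pass equals B's expansion of the remaining runs.
theorem loop_agree (rest : List Char) :
    ∀ (rc : Char) (k : Nat) (s : PySem.Set Int), 1 ≤ k →
    (∀ c ∈ rest, c ∈ pvAlphabets) → rc ∈ pvAlphabets →
    (rest.foldl pvStepA (List.replicate k rc, pvExpandRun s (rc, (k : Int)))).2 =
      (pvRle rc (k : Int) rest).foldl pvExpandRun s := by
  induction rest with
  | nil => intro rc k s hk _ _; rfl
  | cons c rest ih =>
    intro rc k s hk hmem hrc
    have hc : c ∈ pvAlphabets := hmem c (by simp)
    have hval : pvMydict.getD c 0 = pvValB c := pvMydict_getD c hc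
    have hrest : ∀ x ∈ rest, x ∈ pvAlphabets := fun x hx => hmem x (by simp [hx])
    by_cases h : c = rc
    · subst h
      have hstepA : pvStepA (List.replicate k c, pvExpandRun s (c, (k : Int))) c
          = (List.replicate (k + 1) c, pvExpandRun s (c, (k : Int) + 1)) := by
        -- branch 'arr[i] in current_substring': value * len(cur)
        simp only [pvStepA, isIn_replicate c c k hk, hval]
        simp only [BEq.rfl, Bool.true_eq_false, if_false, List.replicate_succ']
        rw [expandRun_succ]
        have hlen : (((List.replicate k c ++ [c]).length : Nat) : Int) = (k : Int) + 1 := by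
          simp
        rw [hlen]
      rw [List.foldl_cons, hstepA]
      have hrle : pvRle c (k : Int) (c :: rest) = pvRle c ((k : Int) + 1) rest := by
        simp [pvRle]
      rw [hrle]
      have := ih c (k + 1) s (by omega) hrest hc
      simpa [Nat.cast_add] using this
    · have h1 : pvExpandRun (pvExpandRun s (rc, (k : Int))) (c, (1 : Int))
          = PySem.Set.add (pvExpandRun s (rc, (k : Int))) (pvValB c) := by
        show pvExpandRun _ (c, ((0 : Nat) : Int) + 1) = _
        rw [expandRun_succ]
        simp [pvExpandRun, PySem.List.pyRange]
      have hstepA : pvStepA (List.replicate k rc, pvExpandRun s (rc, (k : Int))) c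
          = (List.replicate 1 c,
             pvExpandRun (pvExpandRun s (rc, (k : Int))) (c, (1 : Int))) := by
        -- branch 'arr[i] not in current_substring': a fresh run of length 1
        simp only [pvStepA, isIn_replicate c rc k hk, hval]
        simp [h, h1]
      rw [List.foldl_cons, hstepA]
      have hrle : pvRle rc (k : Int) (c :: rest) = (rc, (k : Int)) :: pvRle c 1 rest := by
        have hne : (rc == c) = false := beq_eq_false_iff_ne.mpr (Ne.symm h)
        simp [pvRle, hne]
      rw [hrle, List.foldl_cons]
      have := ih c 1 (pvExpandRun s (rc, (k : Int))) (by omega) hrest hc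
      simpa using this

-- ===== VERDICT (by name: the statement is the Claim_ definition above) =====
theorem sumSet_spec : Claim_equal_sumSet := by
  intro arr _ hpre
  obtain ⟨hne, hall⟩ := hpre
  unfold Spec_sumSet sumSet sumSet_alt
  cases hcs : arr.toList with
  | nil => exact absurd hcs hne
  | cons c0 rest =>
    simp only
    have hmem : ∀ c ∈ arr.toList, c ∈ pvAlphabets := by
      intro c hc
      have hb := of_decide_eq_true (List.all_eq_true.mp hall c hc)
      exact pvMemAlphabets c hb.1 hb.2
    have hc0 : c0 ∈ pvAlphabets := hmem c0 (by simp [hcs])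
    have hrest : ∀ c ∈ rest, c ∈ pvAlphabets := fun c hc => hmem c (by simp [hcs, hc])
    -- turn A's index fold over range(1, len) into a fold over rest
    have hfold := PySem.List.foldl_pyRange_pyGetD' (xs := c0 :: rest) (a := 1)
      (d := ' ') (f := pvStepA)
      (init := ([c0], PySem.Set.add PySem.Set.empty (pvMydict.getD c0 0)))
      (by omega)
    rw [hfold]
    have hdrop : (c0 :: rest).drop (1 : Int).toNat = rest := rfl
    rw [hdrop]
    -- A's initial state is the expansion of the run (c0, 1) from the empty set
    have hinit : PySem.Set.add PySem.Set.empty (pvMydict.getD c0 0)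
        = pvExpandRun PySem.Set.empty (c0, ((1 : Nat) : Int)) := by
      rw [pvMydict_getD c0 hc0]
      show _ = pvExpandRun _ (c0, ((0 : Nat) : Int) + 1)
      rw [expandRun_succ]
      simp [pvExpandRun, PySem.List.pyRange]
    rw [hinit]
    -- B's first stage is pvRle c0 1 rest
    have hruns : (c0 :: rest).foldl pvRunsStep [] = pvRle c0 1 rest := by
      have h0 : pvRunsStep [] c0 = [] ++ [(c0, 1)] := rfl
      rw [List.foldl_cons, h0, pvRuns_eq_rle rest [] c0 1]
      simp
    rw [hruns]
    have := loop_agree rest c0 1 PySem.Set.empty (by omega) hrest hc0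
    have h1 : List.replicate 1 c0 = [c0] := rfl
    rw [h1] at this
    exact_mod_cast this
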